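-- pv_equiv track=rewrite | github.com/SuperHotDogCat/coding-interview | arai60/zigzag_conversion/phase2.py | create_string_index_to_col_index
-- ===== SOURCE A (Python) =====
-- def create_string_index_to_col_index(numRows: int)->dict:
--     string_index_to_col_index = {}
--     for string_index in range(numRows):
--         col_index = string_index
--         string_index_to_col_index[string_index] = col_index
--         #{0: 0, 1: 1, 2: 2, ..., numRows - 1: numRows - 1}
--     for difference_index in range(numRows - 2):
--         string_index = numRows + difference_index
--         col_index = numRows - difference_index - 2
--         string_index_to_col_index[string_index] = col_index
--     # 周期2*numRows - 2で変化するindexの辞書ができた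
--     #{0: 0, 1: 1, 2: 2, ..., numRows - 1: numRows - 1, numRows: numRows - 2, ..., 2 * numRows - 3: 1}
--     return string_index_to_col_index
-- ===== SOURCE B (Python) =====
-- def create_string_index_to_col_index(numRows: int) -> dict:
--     # one pass: triangle-wave column index, closed form
--     peak = numRows - 1
--     return {i: peak - abs(peak - i) for i in range(max(numRows, 2 * numRows - 2))}
-- ===== Notes on version B (the rewrite author's own statement) =====
-- stated objective: simpler
-- what changed: Replaces A's two separate loops (ascending run, then descending run) with a single dict comprehension over one range using the closed-form triangle-wave column index (numRows-1) - abs((numRows-1) - i).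
import Mathlib
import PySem

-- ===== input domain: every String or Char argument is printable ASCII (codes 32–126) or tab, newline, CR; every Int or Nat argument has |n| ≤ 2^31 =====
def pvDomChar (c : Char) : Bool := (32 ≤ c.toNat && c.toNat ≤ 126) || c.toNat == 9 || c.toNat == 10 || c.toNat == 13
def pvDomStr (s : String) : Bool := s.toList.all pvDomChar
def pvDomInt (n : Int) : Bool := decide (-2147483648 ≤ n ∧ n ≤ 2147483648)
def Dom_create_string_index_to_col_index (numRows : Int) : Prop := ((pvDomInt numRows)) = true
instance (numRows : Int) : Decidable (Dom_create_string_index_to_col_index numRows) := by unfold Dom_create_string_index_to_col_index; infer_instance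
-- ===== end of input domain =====

-- B replaces A's two loops with one range and a closed-form triangle-wave column (same cost, simpler).
-- ===== PORT A =====
def create_string_index_to_col_index (numRows : Int) : List (Int × Int) :=
  let d1 : PySem.Dict Int Int :=
    (PySem.List.pyRange 0 numRows 1).foldl (fun d string_index => d.insert string_index string_index) PySem.Dict.empty
  let d2 : PySem.Dict Int Int :=
    (PySem.List.pyRange 0 (numRows - 2) 1).foldl
      (fun d difference_index => d.insert (numRows + difference_index) (numRows - difference_index - 2)) d1
  d2.items

-- ===== PORT B =====
def create_string_index_to_col_index_alt (numRows : Int) : List (Int × Int) :=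
  let peak := numRows - 1
  ((PySem.List.pyRange 0 (max numRows (2 * numRows - 2)) 1).foldl
      (fun d i => d.insert i (peak - |peak - i|)) PySem.Dict.empty).items

-- ===== PRECONDITION & SPEC =====
def Spec_create_string_index_to_col_index (numRows : Int) (out : List (Int × Int)) : Prop := out = create_string_index_to_col_index_alt numRows
instance (numRows : Int) (out : List (Int × Int)) : Decidable (Spec_create_string_index_to_col_index numRows out) := by unfold Spec_create_string_index_to_col_index; infer_instance

-- ===== CLAIM (what is proved, stated in full; the proofs are below) =====
def Claim_equal_create_string_index_to_col_index : Prop := ∀ (numRows : Int), Dom_create_string_index_to_col_index numRows → Spec_create_string_index_to_col_index numRows (create_string_index_to_col_index numRows)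

-- ===== LEMMAS AND PROOFS =====

-- A's dict is built by inserting fresh keys only: its items list is the two runs appended.
theorem itemsA (n : Int) :
    create_string_index_to_col_index n =
      (PySem.List.pyRange 0 n 1).map (fun i => (i, i)) ++
      (PySem.List.pyRange 0 (n - 2) 1).map (fun d => (n + d, n - d - 2)) := by
  unfold create_string_index_to_col_index
  have h1 : ((PySem.List.pyRange 0 n 1).foldl
      (fun (d : PySem.Dict Int Int) string_index => d.insert string_index string_index)
      PySem.Dict.empty).items
      = PySem.Dict.empty.items ++ (PySem.List.pyRange 0 n 1).map (fun i => (i, i)) :=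
    PySem.Dict.items_foldl_insert_fresh (l := PySem.List.pyRange 0 n 1)
      (k := fun x => x) (v := fun x => x) (d := PySem.Dict.empty)
      (by intro a _; simp [PySem.Dict.contains_empty])
      (by simpa using PySem.List.nodup_pyRange_one 0 n)
  have hkeys : ((PySem.List.pyRange 0 n 1).foldl
      (fun (d : PySem.Dict Int Int) string_index => d.insert string_index string_index)
      PySem.Dict.empty).keys = PySem.Set.update PySem.Dict.empty.keys (PySem.List.pyRange 0 n 1) :=
    PySem.Dict.keys_foldl_insert (PySem.List.pyRange 0 n 1) (fun _ x => x) PySem.Dict.empty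
  have h2 := PySem.Dict.items_foldl_insert_fresh
      (l := PySem.List.pyRange 0 (n - 2) 1)
      (k := fun d => n + d) (v := fun d => n - d - 2)
      (d := (PySem.List.pyRange 0 n 1).foldl
        (fun (d : PySem.Dict Int Int) string_index => d.insert string_index string_index)
        PySem.Dict.empty)
      (by
        intro a ha
        rw [PySem.Dict.contains_eq_decide_mem_keys, hkeys]
        simp only [PySem.Dict.keys_empty]
        have : n + a ∉ PySem.Set.update ([] : List Int) (PySem.List.pyRange 0 n 1) := by
          rw [PySem.Set.mem_update]
          rw [PySem.List.mem_pyRange_one] at ha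
          simp [PySem.List.mem_pyRange_one]
          omega
        simp [this])
      (by
        have : ((PySem.List.pyRange 0 (n - 2) 1).map (fun d => n + d)).Nodup := by
          refine (PySem.List.nodup_pyRange_one 0 (n - 2)).map ?_
          intro a b h; exact add_left_cancel h
        exact this)
  rw [h2, h1]
  simp [PySem.Dict.empty]

-- B's dict likewise: one run of fresh keys.
theorem itemsB (n : Int) :
    create_string_index_to_col_index_alt n =
      (PySem.List.pyRange 0 (max n (2 * n - 2)) 1).map
        (fun i => (i, (n - 1) - |(n - 1) - i|)) := by
  unfold create_string_index_to_col_index_alt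
  have h := PySem.Dict.items_foldl_insert_fresh
      (l := PySem.List.pyRange 0 (max n (2 * n - 2)) 1)
      (k := fun x => x) (v := fun i => (n - 1) - |(n - 1) - i|)
      (d := (PySem.Dict.empty : PySem.Dict Int Int))
      (by intro a _; simp [PySem.Dict.contains_empty])
      (by simpa using PySem.List.nodup_pyRange_one 0 (max n (2 * n - 2)))
  simpa using h

-- ===== VERDICT (by name: the statement is the Claim_ definition above) =====
theorem create_string_index_to_col_index_spec : Claim_equal_create_string_index_to_col_index := by
  intro n _
  unfold Spec_create_string_index_to_col_index
  rw [itemsA, itemsB]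
  by_cases hn : n ≤ 2
  · -- max n (2n-2) = n; the second run is empty
    have hmax : max n (2 * n - 2) = n := by omega
    have hnil : PySem.List.pyRange 0 (n - 2) 1 = [] :=
      PySem.List.pyRange_one_eq_nil (by omega)
    rw [hmax, hnil]
    simp only [List.map_nil, List.append_nil]
    refine (List.map_congr_left ?_).symm
    intro i hi
    rw [PySem.List.mem_pyRange_one] at hi
    have h0 : (0:Int) ≤ (n - 1) - i := by omega
    simp only [Prod.mk.injEq, abs_of_nonneg h0]
    exact ⟨trivial, by omega⟩
  · -- n ≥ 3: split B's range at n
    have hmax : max n (2 * n - 2) = 2 * n - 2 := by omega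
    rw [hmax, PySem.List.pyRange_one_append 0 n (2 * n - 2) (by omega) (by omega),
      List.map_append]
    congr 1
    · refine (List.map_congr_left ?_).symm
      intro i hi
      rw [PySem.List.mem_pyRange_one] at hi
      have h0 : (0:Int) ≤ (n - 1) - i := by omega
      simp only [Prod.mk.injEq, abs_of_nonneg h0]
      exact ⟨trivial, by omega⟩
    · rw [PySem.List.pyRange_one, PySem.List.pyRange_one, List.map_map, List.map_map]
      have : (2 * n - 2 - n).toNat = (n - 2 - 0).toNat := by omega
      rw [this]
      refine List.map_congr_left ?_
      intro k _
      have habs : |(n - 1) - (n + (k : Int))| = (k : Int) + 1 := by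
        rw [abs_of_nonpos (by omega)]; ring
      simp only [Function.comp, Prod.mk.injEq, habs]
      exact ⟨by omega, by omega⟩
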